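-- pv_equiv track=rewrite | github.com/DozzzeN/SKG | segmentation/test_partition.py | partition_with_occupy_dp
-- ===== SOURCE A (Python) =====
-- def partition_with_occupy_dp(length, min_length=2, max_length=None, occupied_segments=None, num_partitions=None):
--     if max_length is None:
--         max_length = length
--
--     if occupied_segments is None:
--         occupied_segments = []
--
--     # Create a list representing the availability of each position
--     availability = [True] * length
--     for start, end in occupied_segments:
--         for i in range(start, end):
--             availability[i] = False
--
--     def is_available(start, end):
--         return all(availability[i] for i in range(start, end))
--
--     # Dynamic programming table to store the solutions
--     dp = {}
--
--     def dp_helper(remaining_length, remaining_partitions, current_start):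
--         if (remaining_length, remaining_partitions, current_start) in dp:
--             return dp[(remaining_length, remaining_partitions, current_start)]
--
--         if remaining_length == 0 and (remaining_partitions is None or remaining_partitions == 0):
--             return [[]]
--         if remaining_length < min_length or (remaining_partitions is not None and remaining_partitions == 0):
--             return []
--
--         partitions = []
--         for size in range(min_length, min(max_length, remaining_length) + 1):
--             for start in range(current_start, length - size + 1):
--                 end = start + size
--                 if is_available(start, end):
--                     next_partitions = dp_helper(
--                         remaining_length - size,
--                         remaining_partitions - 1 if remaining_partitions else None,
--                         end
--                     )
--                     for partition in next_partitions:
--                         partitions.append([(start, end)] + partition)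
--
--         dp[(remaining_length, remaining_partitions, current_start)] = partitions
--         return partitions
--
--     results = dp_helper(length - sum([index[1] - index[0] for index in occupied_segments]), num_partitions, 0)
--     segment_methods = []
--     for interval in results:
--         segment_methods.append([index[1] - index[0] for index in interval])
--     return segment_methods
-- ===== SOURCE B (Python) =====
-- def partition_with_occupy_dp(length, min_length=2, max_length=None, occupied_segments=None, num_partitions=None):
--     if max_length is None:
--         max_length = length
--     occ = occupied_segments if occupied_segments is not None else []
--
--     # Difference array -> prefix counts of blocked positions:
--     # window [s, e) is free iff pre[e] == pre[s].
--     diff = [0] * (length + 1)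
--     for s, e in occ:
--         if s < e:
--             diff[s] += 1
--             diff[e] -= 1
--     pre = [0]
--     cover = 0
--     for i in range(length):
--         cover += diff[i]
--         pre.append(pre[-1] + (1 if cover > 0 else 0))
--
--     out = []
--     dead = set()  # states known to contribute no partition (negative memoization)
--
--     # Accumulator-passing enumeration: acc is the list of sizes chosen so far;
--     # each finished partition is appended to the shared output list.
--     def go(rem, parts, cs, acc):
--         if rem == 0 and (parts is None or parts == 0):
--             out.append(acc)
--             return
--         if rem < min_length or parts == 0:
--             return
--         key = (rem, parts, cs)
--         if key in dead:
--             return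
--         n = len(out)
--         for size in range(min_length, min(max_length, rem) + 1):
--             for start in range(cs, length - size + 1):
--                 end = start + size
--                 if pre[end] == pre[start]:
--                     go(rem - size, None if parts is None else parts - 1, end, acc + [size])
--         if len(out) == n:
--             dead.add(key)
--
--     go(length - sum(e - s for s, e in occ), num_partitions, 0, [])
--     return out
-- ===== Notes on version B (the rewrite author's own statement) =====
-- stated objective: alternative
-- what changed: B drops A's memo table and value-returning recursion entirely: it enumerates partitions by an accumulator-passing recursion that appends each finished size-list to a shared output, tests window availability via a difference array and prefix counts of blocked positions (two lookups instead of A's per-window scan over a mutable boolean array), and builds size lists directly instead of interval lists mapped to sizes in a final pass.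
-- outside the precondition, e.g. on partition_with_occupy_dp(2, -3, -1, None, 7): A returns [], B raises IndexError; on partition_with_occupy_dp(0, 0, None, None, None): A returns [[]], B returns [[]]
import Mathlib
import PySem

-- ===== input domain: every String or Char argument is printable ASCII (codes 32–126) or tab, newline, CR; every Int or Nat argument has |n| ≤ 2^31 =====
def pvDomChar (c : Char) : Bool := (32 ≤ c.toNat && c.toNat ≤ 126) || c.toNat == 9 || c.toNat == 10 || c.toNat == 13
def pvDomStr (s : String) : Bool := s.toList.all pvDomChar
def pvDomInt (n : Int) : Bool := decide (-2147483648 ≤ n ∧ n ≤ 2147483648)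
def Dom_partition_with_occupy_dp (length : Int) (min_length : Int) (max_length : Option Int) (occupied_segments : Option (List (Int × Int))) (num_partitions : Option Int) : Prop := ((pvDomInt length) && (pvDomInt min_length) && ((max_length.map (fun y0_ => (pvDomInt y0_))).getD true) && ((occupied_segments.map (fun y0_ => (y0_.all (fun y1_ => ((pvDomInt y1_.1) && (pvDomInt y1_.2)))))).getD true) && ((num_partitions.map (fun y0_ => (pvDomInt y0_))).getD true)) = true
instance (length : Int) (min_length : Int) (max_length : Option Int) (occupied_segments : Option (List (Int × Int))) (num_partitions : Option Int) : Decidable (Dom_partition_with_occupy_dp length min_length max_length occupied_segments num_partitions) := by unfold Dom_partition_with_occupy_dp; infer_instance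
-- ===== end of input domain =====

-- ===== PORT A =====
-- B replaces A's memoized value-returning recursion over a scanned boolean availability array by an
-- accumulator-passing enumeration with prefix-count availability tests (no memo, sizes built directly).
-- A's port models Python's mutable lists by Arrays and threads the memo dict exactly as Python does;
-- fuel = remaining_length + 1 bounds the recursion depth since min_length >= 1 under Pre_.

-- Python a[i] = v: a negative index counts from the end; out of range raises IndexError (outside Pre_: no-op here)
def pvSetItem {A : Type} (a : Array A) (i : Int) (v : A) : Array A :=
  let j := if i < 0 then i + (a.size : Int) else i
  if 0 ≤ j then a.setIfInBounds j.toNat v else a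

-- Python a[i]: a negative index counts from the end; out of range raises IndexError (outside Pre_: default here)
def pvGetItem {A : Type} (a : Array A) (i : Int) (d : A) : A :=
  let j := if i < 0 then i + (a.size : Int) else i
  if h : 0 ≤ j ∧ j.toNat < a.size then a[j.toNat]'h.2 else d

-- availability = [True]*length; for start,end in occupied: for i in range(start,end): availability[i] = False
def pvA_avail (length : Int) (occ : List (Int × Int)) : Array Bool :=
  occ.foldl
    (fun av se => (PySem.List.pyRange se.1 se.2 1).foldl (fun a i => pvSetItem a i false) av)
    (Array.replicate length.toNat true)

-- is_available(start, end) = all(availability[i] for i in range(start, end))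
def pvA_isAvail (av : Array Bool) (s e : Int) : Bool :=
  (PySem.List.pyRange s e 1).all (fun i => pvGetItem av i false)

-- dp_helper with its memo dict threaded through (dp, result)
def pvA_helper (length minL maxL : Int) (av : Array Bool) :
    Nat → Std.HashMap (Int × Option Int × Int) (List (List (Int × Int))) → Int → Option Int → Int
      → Std.HashMap (Int × Option Int × Int) (List (List (Int × Int))) × List (List (Int × Int))
  | 0, dp, _, _, _ => (dp, [])
  | fuel+1, dp, rem, rp, cs =>
    match dp[(rem, rp, cs)]? with
    | some v => (dp, v)
    | none =>
      if rem = 0 ∧ (rp = none ∨ rp = some 0) then (dp, [[]])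
      else if rem < minL ∨ rp = some 0 then (dp, [])
      else
        let st :=
          (PySem.List.pyRange minL (min maxL rem + 1) 1).foldl (fun st size =>
            (PySem.List.pyRange cs (length - size + 1) 1).foldl (fun st2 start =>
              if pvA_isAvail av start (start + size) then
                let r := pvA_helper length minL maxL av fuel st2.1 (rem - size)
                    (match rp with
                     | none => none
                     | some k => if k = 0 then none else some (k - 1)) (start + size)
                (r.1, st2.2 ++ r.2.map (fun p => (start, start + size) :: p))
              else st2) st) (dp, [])
        (st.1.insert (rem, rp, cs) st.2, st.2)

def partition_with_occupy_dp (length : Int) (min_length : Int) (max_length : Option Int) (occupied_segments : Option (List (Int × Int))) (num_partitions : Option Int) : List (List Int) :=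
  let maxL := max_length.getD length
  let occ := occupied_segments.getD []
  let av := pvA_avail length occ
  let rem := length - (occ.map (fun se => se.2 - se.1)).sum
  ((pvA_helper length min_length maxL av (rem.toNat + 1) ∅ rem num_partitions 0).2).map
    (fun interval => interval.map (fun se => se.2 - se.1))

-- ===== PORT B =====
-- diff = [0]*(length+1); for s,e in occ: if s < e: diff[s] += 1; diff[e] -= 1
def pvB_diff (length : Int) (occ : List (Int × Int)) : Array Int :=
  occ.foldl
    (fun d se =>
      if se.1 < se.2 then
        let d1 := pvSetItem d se.1 (pvGetItem d se.1 0 + 1)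
        pvSetItem d1 se.2 (pvGetItem d1 se.2 0 - 1)
      else d)
    (Array.replicate (length + 1).toNat 0)

-- pre = [0]; cover = 0; for i in range(length): cover += diff[i]; pre.append(pre[-1] + (1 if cover > 0 else 0))
def pvB_pre (length : Int) (diff : Array Int) : Array Int :=
  ((PySem.List.pyRange 0 length 1).foldl
    (fun st i =>
      let cover := st.2 + pvGetItem diff i 0
      (st.1.push (pvGetItem st.1 (-1) 0 + (if 0 < cover then 1 else 0)), cover))
    (#[(0 : Int)], (0 : Int))).1

-- go(rem, parts, cs, acc): acc is the path of chosen sizes; finished partitions are appended to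
-- the shared output list; 'dead' is the set of states already seen to contribute nothing
-- (state (dead, out) is threaded through the fold and the recursive calls)
def pvB_go (length minL maxL : Int) (pre : Array Int) :
    Nat → Int → Option Int → Int → List Int
      → Std.HashSet (Int × Option Int × Int) × List (List Int)
      → Std.HashSet (Int × Option Int × Int) × List (List Int)
  | 0, _, _, _, _, st => st
  | fuel+1, rem, parts, cs, acc, st =>
    if rem = 0 ∧ (parts = none ∨ parts = some 0) then (st.1, st.2 ++ [acc])
    else if rem < minL ∨ parts = some 0 then st
    else if (rem, parts, cs) ∈ st.1 then st
    else
      let st' :=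
        (PySem.List.pyRange minL (min maxL rem + 1) 1).foldl (fun st1 size =>
          (PySem.List.pyRange cs (length - size + 1) 1).foldl (fun st2 start =>
            if pvGetItem pre (start + size) 0 = pvGetItem pre start 0 then
              pvB_go length minL maxL pre fuel (rem - size) (parts.map (fun k => k - 1))
                (start + size) (acc ++ [size]) st2
            else st2) st1) st
      if st'.2.length = st.2.length then (st'.1.insert (rem, parts, cs), st'.2) else st'

def partition_with_occupy_dp_alt (length : Int) (min_length : Int) (max_length : Option Int) (occupied_segments : Option (List (Int × Int))) (num_partitions : Option Int) : List (List Int) :=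
  let maxL := max_length.getD length
  let occ := occupied_segments.getD []
  let pre := pvB_pre length (pvB_diff length occ)
  let rem := length - (occ.map (fun se => se.2 - se.1)).sum
  (pvB_go length min_length maxL pre (rem.toNat + 1) rem num_partitions 0 [] (∅, [])).2

-- ===== PRECONDITION & SPEC =====
-- Pre_ excludes min_length <= 0, on which A's recursion does not terminate (RecursionError) except on
-- degenerate inputs with nothing left to place (where both programs return [[]] without recursing), and
-- occupied segments reaching outside [0, length), on which A either raises IndexError or silently wraps
-- a negative position to the end of the availability array.
def Pre_partition_with_occupy_dp (length : Int) (min_length : Int) (max_length : Option Int) (occupied_segments : Option (List (Int × Int))) (num_partitions : Option Int) : Prop :=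
  1 ≤ min_length ∧
  ∀ se ∈ occupied_segments.getD [], se.1 < se.2 → 0 ≤ se.1 ∧ se.2 ≤ length
instance (length : Int) (min_length : Int) (max_length : Option Int) (occupied_segments : Option (List (Int × Int))) (num_partitions : Option Int) : Decidable (Pre_partition_with_occupy_dp length min_length max_length occupied_segments num_partitions) := by unfold Pre_partition_with_occupy_dp; infer_instance

def pvWitness_partition_with_occupy_dp : Int × Int × Option Int × (Option (List (Int × Int))) × Option Int :=
  (7, 2, none, some [(2, 4)], none)

def Spec_partition_with_occupy_dp (length : Int) (min_length : Int) (max_length : Option Int) (occupied_segments : Option (List (Int × Int))) (num_partitions : Option Int) (out : List (List Int)) : Prop := out = partition_with_occupy_dp_alt length min_length max_length occupied_segments num_partitions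
instance (length : Int) (min_length : Int) (max_length : Option Int) (occupied_segments : Option (List (Int × Int))) (num_partitions : Option Int) (out : List (List Int)) : Decidable (Spec_partition_with_occupy_dp length min_length max_length occupied_segments num_partitions out) := by unfold Spec_partition_with_occupy_dp; infer_instance

-- ===== CLAIM (what is proved, stated in full; the proofs are below) =====
def Claim_equal_partition_with_occupy_dp : Prop := ∀ (length : Int) (min_length : Int) (max_length : Option Int) (occupied_segments : Option (List (Int × Int))) (num_partitions : Option Int), Dom_partition_with_occupy_dp length min_length max_length occupied_segments num_partitions → Pre_partition_with_occupy_dp length min_length max_length occupied_segments num_partitions → Spec_partition_with_occupy_dp length min_length max_length occupied_segments num_partitions (partition_with_occupy_dp length min_length max_length occupied_segments num_partitions)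

-- ===== LEMMAS AND PROOFS =====

-- ---------- memo-free reference recursions (proof-side) ----------
def pvA_spec (length minL maxL : Int) (av : Array Bool) :
    Nat → Int → Option Int → Int → List (List (Int × Int))
  | 0, _, _, _ => []
  | fuel+1, rem, rp, cs =>
    if rem = 0 ∧ (rp = none ∨ rp = some 0) then [[]]
    else if rem < minL ∨ rp = some 0 then []
    else
      (PySem.List.pyRange minL (min maxL rem + 1) 1).foldl (fun parts size =>
        (PySem.List.pyRange cs (length - size + 1) 1).foldl (fun parts2 start =>
          if pvA_isAvail av start (start + size) then
            parts2 ++ (pvA_spec length minL maxL av fuel (rem - size)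
                (match rp with
                 | none => none
                 | some k => if k = 0 then none else some (k - 1)) (start + size)).map
              (fun p => (start, start + size) :: p)
          else parts2) parts) []

def pvB_specF (length minL maxL : Int) (pre : Array Int) :
    Nat → Int → Option Int → Int → List (List Int)
  | 0, _, _, _ => []
  | fuel+1, rem, parts, cs =>
    if rem = 0 ∧ (parts = none ∨ parts = some 0) then [[]]
    else if rem < minL ∨ parts = some 0 then []
    else
      (PySem.List.pyRange minL (min maxL rem + 1) 1).foldl (fun out size =>
        (PySem.List.pyRange cs (length - size + 1) 1).foldl (fun out2 start =>
          if pvGetItem pre (start + size) 0 = pvGetItem pre start 0 then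
            out2 ++ (pvB_specF length minL maxL pre fuel (rem - size)
                (parts.map (fun k => k - 1)) (start + size)).map (fun t => size :: t)
          else out2) out) []

-- ---------- array-accessor lemmas ----------
lemma pvSetItem_size {A : Type} (a : Array A) (i : Int) (v : A) :
    (pvSetItem a i v).size = a.size := by
  unfold pvSetItem
  dsimp only
  split <;> split <;> simp

lemma pvGetItem_of_nonneg {A : Type} (a : Array A) (i : Int) (d : A)
    (h0 : 0 ≤ i) (h1 : i < (a.size : Int)) : pvGetItem a i d = a[i.toNat]'(by omega) := by
  unfold pvGetItem
  have : ¬ i < 0 := by omega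
  simp only [this, if_false]
  have h : 0 ≤ i ∧ i.toNat < a.size := ⟨h0, by omega⟩
  rw [dif_pos h]

lemma pvGetItem_pvSetItem {A : Type} (a : Array A) (i j : Int) (v : A) (d : A)
    (hi0 : 0 ≤ i) (hi1 : i < (a.size : Int)) (hj0 : 0 ≤ j) (hj1 : j < (a.size : Int)) :
    pvGetItem (pvSetItem a i v) j d = if j = i then v else pvGetItem a j d := by
  have hset : pvSetItem a i v = a.setIfInBounds i.toNat v := by
    unfold pvSetItem
    have : ¬ i < 0 := by omega
    simp [this, hi0]
  rw [hset, pvGetItem_of_nonneg _ _ _ hj0 (by simpa using hj1),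
    Array.getElem_setIfInBounds]
  by_cases h : j = i
  · simp [h]
  · have : ¬ i.toNat = j.toNat := by omega
    rw [if_neg this, if_neg h, pvGetItem_of_nonneg _ _ _ hj0 hj1]

lemma pvGetItem_toArray_last (l : List Int) (x : Int) :
    pvGetItem (l ++ [x]).toArray (-1) 0 = x := by
  unfold pvGetItem
  simp only [List.size_toArray, List.length_append, List.length_cons, List.length_nil]
  norm_num

-- i is covered by some occupied segment
def pvBlk (occ : List (Int × Int)) (i : Int) : Bool :=
  occ.any (fun se => decide (se.1 ≤ i ∧ i < se.2))

-- number of blocked positions below k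
def pvCnt (occ : List (Int × Int)) (k : Int) : Int :=
  ((PySem.List.pyRange 0 k 1).countP (fun i => pvBlk occ i) : Int)

-- number of segments covering i / net diff-array entry at i
def pvCov (occ : List (Int × Int)) (i : Int) : Int :=
  (occ.countP (fun se => decide (se.1 ≤ i ∧ i < se.2)) : Int)

def pvDelta (occ : List (Int × Int)) (i : Int) : Int :=
  (occ.countP (fun se => decide (se.1 < se.2 ∧ se.1 = i)) : Int)
    - (occ.countP (fun se => decide (se.1 < se.2 ∧ se.2 = i)) : Int)

-- ---------- A side: the availability array ----------
lemma pvMark_size (l : List Int) (av : Array Bool) :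
    (l.foldl (fun a i => pvSetItem a i false) av).size = av.size := by
  induction l generalizing av with
  | nil => rfl
  | cons x xs ih => simp [List.foldl, ih, pvSetItem_size]

lemma pvMark_get (s e : Int) (av : Array Bool)
    (hb : s < e → 0 ≤ s ∧ e ≤ (av.size : Int)) (j : Int) (hj0 : 0 ≤ j) (hj1 : j < (av.size : Int)) :
    pvGetItem ((PySem.List.pyRange s e 1).foldl (fun a i => pvSetItem a i false) av) j false
      = if s ≤ j ∧ j < e then false else pvGetItem av j false := by
  by_cases hse : s < e
  · obtain ⟨hs0, hel⟩ := hb hse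
    have main : ∀ (n : Nat) (s : Int) (av : Array Bool), (e - s).toNat = n → 0 ≤ s →
        e ≤ (av.size : Int) → j < (av.size : Int) →
        pvGetItem ((PySem.List.pyRange s e 1).foldl (fun a i => pvSetItem a i false) av) j false
          = if s ≤ j ∧ j < e then false else pvGetItem av j false := by
      intro n
      induction n with
      | zero =>
        intro s av hn hs0 hel hjl
        have : e ≤ s := by omega
        rw [PySem.List.pyRange_one_eq_nil this]
        simp only [List.foldl_nil]
        have : ¬ (s ≤ j ∧ j < e) := by omega
        simp [this]
      | succ n ih =>
        intro s av hn hs0 hel hjl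
        have hse' : s < e := by omega
        rw [PySem.List.pyRange_one_cons hse']
        simp only [List.foldl_cons]
        have hlen : ((pvSetItem av s false).size : Int) = av.size := by
          rw [pvSetItem_size]
        rw [ih (s+1) (pvSetItem av s false) (by omega) (by omega) (by omega) (by omega)]
        rw [pvGetItem_pvSetItem av s j false false hs0 (by omega) hj0 hjl]
        by_cases h1 : s ≤ j ∧ j < e
        · by_cases h2 : j = s <;> simp_all <;> omega
        · have hns : ¬ (s + 1 ≤ j ∧ j < e) := by omega
          have hjs : ¬ (j = s) := by omega
          rw [if_neg hns, if_neg hjs, if_neg h1]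
    exact main (e - s).toNat s av rfl hs0 hel hj1
  · rw [PySem.List.pyRange_one_eq_nil (by omega)]
    simp only [List.foldl_nil]
    have : ¬ (s ≤ j ∧ j < e) := by omega
    simp [this]

lemma pvMarkAll_get (occ : List (Int × Int)) (av : Array Bool)
    (hb : ∀ se ∈ occ, se.1 < se.2 → 0 ≤ se.1 ∧ se.2 ≤ (av.size : Int))
    (j : Int) (hj0 : 0 ≤ j) (hj1 : j < (av.size : Int)) :
    pvGetItem
        (occ.foldl (fun av se => (PySem.List.pyRange se.1 se.2 1).foldl
          (fun a i => pvSetItem a i false) av) av) j false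
      = ((!pvBlk occ j) && pvGetItem av j false) := by
  induction occ generalizing av with
  | nil => simp [pvBlk]
  | cons se occ ih =>
    simp only [List.foldl_cons]
    set av' := (PySem.List.pyRange se.1 se.2 1).foldl (fun a i => pvSetItem a i false) av with hav'
    have hlen : (av'.size : Int) = av.size := by rw [hav', pvMark_size]
    rw [ih av' (by rw [hlen]; exact fun t ht => hb t (List.mem_cons_of_mem _ ht)) (by omega)]
    rw [hav', pvMark_get se.1 se.2 av (hb se (List.mem_cons_self)) j hj0 hj1]
    simp only [pvBlk, List.any_cons]
    by_cases h : se.1 ≤ j ∧ j < se.2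
    · simp [h]
    · simp [h]

lemma pvA_avail_get (length : Int) (occ : List (Int × Int))
    (hb : ∀ se ∈ occ, se.1 < se.2 → 0 ≤ se.1 ∧ se.2 ≤ length)
    (j : Int) (hj0 : 0 ≤ j) (hj1 : j < length) :
    pvGetItem (pvA_avail length occ) j false = !pvBlk occ j := by
  unfold pvA_avail
  have hlen : ((Array.replicate length.toNat true).size : Int) = length := by
    simp; omega
  rw [pvMarkAll_get occ _ (by rw [hlen]; exact hb) j hj0 (by omega)]
  rw [pvGetItem_of_nonneg _ _ _ hj0 (by omega)]
  simp

lemma pvA_isAvail_iff (length : Int) (occ : List (Int × Int))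
    (hb : ∀ se ∈ occ, se.1 < se.2 → 0 ≤ se.1 ∧ se.2 ≤ length)
    (s e : Int) (hs : 0 ≤ s) (he : e ≤ length) :
    pvA_isAvail (pvA_avail length occ) s e = true ↔ ∀ i, s ≤ i → i < e → pvBlk occ i = false := by
  unfold pvA_isAvail
  rw [List.all_eq_true]
  constructor
  · intro h i h1 h2
    have := h i (PySem.List.mem_pyRange_one.mpr ⟨h1, h2⟩)
    rw [pvA_avail_get length occ hb i (by omega) (by omega)] at this
    simpa using this
  · intro h i hi
    obtain ⟨h1, h2⟩ := PySem.List.mem_pyRange_one.mp hi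
    rw [pvA_avail_get length occ hb i (by omega) (by omega)]
    simp [h i h1 h2]

-- ---------- B side: diff array and prefix counts ----------
lemma pvB_diff_get (length : Int) (occ : List (Int × Int))
    (hb : ∀ se ∈ occ, se.1 < se.2 → 0 ≤ se.1 ∧ se.2 ≤ length)
    (j : Int) (hj0 : 0 ≤ j) (hj1 : j ≤ length) :
    pvGetItem (pvB_diff length occ) j 0 = pvDelta occ j := by
  unfold pvB_diff
  have main : ∀ (occ : List (Int × Int)) (d : Array Int),
      (d.size : Int) = length + 1 →
      (∀ se ∈ occ, se.1 < se.2 → 0 ≤ se.1 ∧ se.2 ≤ length) →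
      pvGetItem (occ.foldl (fun d se =>
        if se.1 < se.2 then
          let d1 := pvSetItem d se.1 (pvGetItem d se.1 0 + 1)
          pvSetItem d1 se.2 (pvGetItem d1 se.2 0 - 1)
        else d) d) j 0 = pvDelta occ j + pvGetItem d j 0 := by
    intro occ
    induction occ with
    | nil => intro d _ _; simp [pvDelta]
    | cons se occ ih =>
      intro d hd hbb
      simp only [List.foldl_cons]
      by_cases hse : se.1 < se.2
      · obtain ⟨hb1, hb2⟩ := hbb se (List.mem_cons_self) hse
        rw [if_pos hse]
        set d1 := pvSetItem d se.1 (pvGetItem d se.1 0 + 1) with hd1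
        set d2 := pvSetItem d1 se.2 (pvGetItem d1 se.2 0 - 1) with hd2
        have hs1 : (d1.size : Int) = length + 1 := by rw [hd1, pvSetItem_size]; exact hd
        have hs2 : (d2.size : Int) = length + 1 := by rw [hd2, pvSetItem_size]; exact hs1
        rw [ih d2 hs2 (fun t ht => hbb t (List.mem_cons_of_mem _ ht))]
        have hget : pvGetItem d2 j 0 = pvGetItem d j 0
            + (if j = se.1 then 1 else 0) - (if j = se.2 then 1 else 0) := by
          rw [hd2, pvGetItem_pvSetItem d1 se.2 j _ 0 (by omega) (by omega) hj0 (by omega),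
            hd1, pvGetItem_pvSetItem d se.1 se.2 _ 0 (by omega) (by omega) (by omega) (by omega),
            pvGetItem_pvSetItem d se.1 j _ 0 (by omega) (by omega) hj0 (by omega)]
          split_ifs <;> simp_all <;> omega
        rw [hget]
        simp only [pvDelta, List.countP_cons]
        by_cases hA : j = se.1 <;> by_cases hB : j = se.2
        · omega
        · have c1 : decide (se.1 < se.2 ∧ se.1 = j) = true := by simp; omega
          have c2 : decide (se.1 < se.2 ∧ se.2 = j) = false := by simp; omega
          rw [c1, c2, if_pos hA, if_neg hB]
          push_cast
          norm_num
          try omega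
        · have c1 : decide (se.1 < se.2 ∧ se.1 = j) = false := by simp; omega
          have c2 : decide (se.1 < se.2 ∧ se.2 = j) = true := by simp; omega
          rw [c1, c2, if_neg hA, if_pos hB]
          push_cast
          norm_num
          try omega
        · have c1 : decide (se.1 < se.2 ∧ se.1 = j) = false := by simp; omega
          have c2 : decide (se.1 < se.2 ∧ se.2 = j) = false := by simp; omega
          rw [c1, c2, if_neg hA, if_neg hB]
          push_cast
          norm_num
          try omega
      · rw [if_neg hse]
        rw [ih d hd (fun t ht => hbb t (List.mem_cons_of_mem _ ht))]
        simp only [pvDelta, List.countP_cons]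
        have c1 : decide (se.1 < se.2 ∧ se.1 = j) = false := by simp; omega
        have c2 : decide (se.1 < se.2 ∧ se.2 = j) = false := by simp; omega
        rw [c1, c2]
        push_cast
        norm_num
        try omega
  have hrep : ((Array.replicate (length + 1).toNat (0:Int)).size : Int) = length + 1 := by
    simp; omega
  rw [main occ _ hrep hb]
  rw [pvGetItem_of_nonneg _ _ _ hj0 (by omega)]
  simp

lemma pvCov_pos_iff (occ : List (Int × Int)) (i : Int) :
    0 < pvCov occ i ↔ pvBlk occ i = true := by
  unfold pvCov pvBlk
  rw [show (0:Int) < ((occ.countP fun se => decide (se.1 ≤ i ∧ i < se.2)) : Int)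
      ↔ 0 < occ.countP fun se => decide (se.1 ≤ i ∧ i < se.2) by exact_mod_cast Iff.rfl]
  rw [List.countP_pos_iff, List.any_eq_true]

lemma pvCov_step (occ : List (Int × Int)) (i : Int)
    (hb : ∀ se ∈ occ, se.1 < se.2 → 0 ≤ se.1) (hi : 0 ≤ i) :
    pvCov occ i = pvCov occ (i - 1) + pvDelta occ i := by
  induction occ with
  | nil => simp [pvCov, pvDelta]
  | cons se occ ih =>
    have hd := ih (fun t ht h => hb t (List.mem_cons_of_mem _ ht) h)
    simp only [pvCov, pvDelta, List.countP_cons] at hd ⊢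
    push_cast at hd ⊢
    by_cases hsl : se.1 < se.2
    · have h0 : 0 ≤ se.1 := hb se (List.mem_cons_self) hsl
      split_ifs <;> simp only [decide_eq_true_eq, decide_eq_false_iff_not] at * <;> omega
    · split_ifs <;> simp only [decide_eq_true_eq, decide_eq_false_iff_not] at * <;> omega

lemma pvB_pre_toList (length : Int) (occ : List (Int × Int))
    (hb : ∀ se ∈ occ, se.1 < se.2 → 0 ≤ se.1 ∧ se.2 ≤ length) (hl : 0 ≤ length) :
    pvB_pre length (pvB_diff length occ)
      = ((PySem.List.pyRange 0 (length + 1) 1).map (fun k => pvCnt occ k)).toArray := by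
  unfold pvB_pre
  have main : ∀ (n : Nat), (n : Int) ≤ length →
      ((PySem.List.pyRange 0 (n : Int) 1).foldl
        (fun st i =>
          let cover := st.2 + pvGetItem (pvB_diff length occ) i 0
          (st.1.push (pvGetItem st.1 (-1) 0 + (if 0 < cover then 1 else 0)), cover))
        (#[(0 : Int)], (0 : Int)))
      = (((PySem.List.pyRange 0 ((n : Int) + 1) 1).map (fun k => pvCnt occ k)).toArray,
          pvCov occ ((n : Int) - 1)) := by
    intro n
    induction n with
    | zero =>
      intro _
      have h1 : ((0:Nat):Int) = 0 := rfl
      rw [h1, PySem.List.pyRange_one_eq_nil le_rfl, PySem.List.pyRange_one_singleton]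
      simp only [List.foldl_nil, List.map_cons, List.map_nil]
      have hcnt : pvCnt occ 0 = 0 := by
        unfold pvCnt
        rw [PySem.List.pyRange_one_eq_nil le_rfl]
        rfl
      have hzero : occ.countP (fun se => decide (se.1 ≤ 0 - 1 ∧ 0 - 1 < se.2)) = 0 := by
        rw [List.countP_eq_zero]
        intro se hse
        intro hx
        rw [decide_eq_true_eq] at hx
        by_cases h : se.1 < se.2
        · exact absurd (hb se hse h).1 (by omega)
        · omega
      have hcov : pvCov occ (0 - 1) = 0 := by
        unfold pvCov
        rw [hzero]
        rfl
      rw [hcnt, hcov]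
    | succ n ih =>
      intro hn
      have hc : ((n+1:Nat):Int) = (n:Int)+1 := by push_cast; ring
      rw [hc] at hn ⊢
      rw [PySem.List.pyRange_one_succ_right (by positivity), List.foldl_append,
        ih (by omega)]
      simp only [List.foldl_cons, List.foldl_nil]
      have hcov : pvCov occ ((n:Int) - 1) + pvGetItem (pvB_diff length occ) (n:Int) 0
          = pvCov occ (n:Int) := by
        rw [pvB_diff_get length occ hb (n:Int) (by positivity) (by omega)]
        rw [pvCov_step occ (n:Int) (fun t ht h => (hb t ht h).1) (by positivity)]
      have hsplit : PySem.List.pyRange 0 ((n:Int)+1) 1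
          = PySem.List.pyRange 0 (n:Int) 1 ++ [(n:Int)] := by
        rw [PySem.List.pyRange_one_succ_right (by positivity)]
      have hlast : pvGetItem
          (((PySem.List.pyRange 0 ((n:Int)+1) 1).map (fun k => pvCnt occ k)).toArray) (-1) 0
            = pvCnt occ (n:Int) := by
        rw [hsplit, List.map_append]
        exact pvGetItem_toArray_last _ _
      rw [hcov, hlast]
      have hstep : pvCnt occ (n:Int) + (if 0 < pvCov occ (n:Int) then 1 else 0)
          = pvCnt occ ((n:Int)+1) := by
        unfold pvCnt
        rw [PySem.List.pyRange_one_succ_right (a := 0) (b := (n:Int)) (by positivity),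
          List.countP_append]
        simp only [List.countP_cons, List.countP_nil]
        by_cases hblk : pvBlk occ (n:Int) = true
        · rw [if_pos ((pvCov_pos_iff occ (n:Int)).mpr hblk), if_pos hblk]
          push_cast
          ring
        · have hnc : ¬ 0 < pvCov occ (n:Int) := fun hcpos => hblk ((pvCov_pos_iff occ (n:Int)).mp hcpos)
          rw [if_neg hnc, if_neg hblk]
          push_cast
          ring
      rw [hstep]
      have h2 : PySem.List.pyRange 0 ((n:Int)+1+1) 1
          = PySem.List.pyRange 0 ((n:Int)+1) 1 ++ [(n:Int)+1] := by
        rw [PySem.List.pyRange_one_succ_right (by positivity)]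
      rw [h2, List.map_append]
      refine Prod.ext ?_ ?_
      · show (((PySem.List.pyRange 0 ((n:Int)+1) 1).map (fun k => pvCnt occ k)).toArray).push
            (pvCnt occ ((n:Int)+1))
          = (((PySem.List.pyRange 0 ((n:Int)+1) 1).map (fun k => pvCnt occ k))
              ++ [pvCnt occ ((n:Int)+1)]).toArray
        rw [List.push_toArray]
      · show pvCov occ (n:Int) = pvCov occ ((n:Int) + 1 - 1)
        norm_num
  obtain ⟨n, rfl⟩ : ∃ n : Nat, length = (n : Int) := ⟨length.toNat, by omega⟩
  rw [main n le_rfl]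

lemma pvB_pre_get (length : Int) (occ : List (Int × Int))
    (hb : ∀ se ∈ occ, se.1 < se.2 → 0 ≤ se.1 ∧ se.2 ≤ length) (hl : 0 ≤ length)
    (k : Int) (h0 : 0 ≤ k) (h1 : k ≤ length) :
    pvGetItem (pvB_pre length (pvB_diff length occ)) k 0 = pvCnt occ k := by
  rw [pvB_pre_toList length occ hb hl]
  have hsz : (((((PySem.List.pyRange 0 (length + 1) 1).map (fun k => pvCnt occ k))).toArray).size : Int)
      = length + 1 := by
    simp [PySem.List.length_pyRange_one]
    omega
  rw [pvGetItem_of_nonneg _ _ _ h0 (by omega)]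
  rw [← Array.getElem_toList]
  simp only [List.toList_toArray]
  rw [List.getElem_map]
  congr 1
  rw [PySem.List.getElem_pyRange_one]
  omega

lemma pvB_pre_eq_iff (length : Int) (occ : List (Int × Int))
    (hb : ∀ se ∈ occ, se.1 < se.2 → 0 ≤ se.1 ∧ se.2 ≤ length)
    (s e : Int) (hs : 0 ≤ s) (hse : s ≤ e) (he : e ≤ length) :
    (pvGetItem (pvB_pre length (pvB_diff length occ)) e 0
        = pvGetItem (pvB_pre length (pvB_diff length occ)) s 0)
      ↔ ∀ i, s ≤ i → i < e → pvBlk occ i = false := by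
  rw [pvB_pre_get length occ hb (by omega) e (by omega) he,
    pvB_pre_get length occ hb (by omega) s hs (by omega)]
  unfold pvCnt
  rw [PySem.List.pyRange_one_append 0 s e hs hse, List.countP_append]
  rw [show ((((PySem.List.pyRange 0 s 1).countP (fun i => pvBlk occ i)
      + (PySem.List.pyRange s e 1).countP (fun i => pvBlk occ i) : Nat)) : Int)
      = ((PySem.List.pyRange 0 s 1).countP (fun i => pvBlk occ i) : Int)
      + ((PySem.List.pyRange s e 1).countP (fun i => pvBlk occ i) : Int) by push_cast; ring]
  constructor
  · intro h i h1 h2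
    have hz : (PySem.List.pyRange s e 1).countP (fun i => pvBlk occ i) = 0 := by omega
    rw [List.countP_eq_zero] at hz
    have := hz i (PySem.List.mem_pyRange_one.mpr ⟨h1, h2⟩)
    simpa using this
  · intro h
    have hz : (PySem.List.pyRange s e 1).countP (fun i => pvBlk occ i) = 0 := by
      rw [List.countP_eq_zero]
      intro a ha
      obtain ⟨h1, h2⟩ := PySem.List.mem_pyRange_one.mp ha
      simp [h a h1 h2]
    omega

-- ---------- fold shapes ----------
lemma pvFoldIf {G : Type} (l : List Int) (c : Int → Prop) [DecidablePred c] (g : Int → List G)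
    (init : List G) :
    l.foldl (fun acc x => if c x then acc ++ g x else acc) init
      = init ++ l.flatMap (fun x => if c x then g x else []) := by
  have : (fun (acc : List G) x => if c x then acc ++ g x else acc)
      = (fun acc x => acc ++ if c x then g x else []) := by
    funext acc x
    split <;> simp
  rw [this, PySem.List.foldl_append_eq_flatMap]

lemma pvNestedFold {G : Type} (sizes : List Int) (starts : Int → List Int)
    (c : Int → Int → Prop) [∀ s t, Decidable (c s t)] (g : Int → Int → List G) :
    sizes.foldl (fun parts size => (starts size).foldl
        (fun p2 start => if c size start then p2 ++ g size start else p2) parts) []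
      = sizes.flatMap (fun size => (starts size).flatMap
          (fun start => if c size start then g size start else [])) := by
  have hb : (fun (parts : List G) size => (starts size).foldl
        (fun p2 start => if c size start then p2 ++ g size start else p2) parts)
      = (fun parts size => parts ++ (starts size).flatMap
          (fun start => if c size start then g size start else [])) := by
    funext parts size
    rw [pvFoldIf]
  rw [hb, PySem.List.foldl_append_eq_flatMap, List.nil_append]

-- ---------- the two reference recursions agree ----------
lemma pvHelper_eq (length minL maxL : Int) (av : Array Bool) (pre : Array Int)
    (hmin : 1 ≤ minL)
    (H : ∀ s e : Int, 0 ≤ s → s < e → e ≤ length →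
      (pvA_isAvail av s e = true ↔ pvGetItem pre e 0 = pvGetItem pre s 0)) :
    ∀ (fuel : Nat) (rem : Int) (rp : Option Int) (cs : Int), 0 ≤ cs →
      (pvA_spec length minL maxL av fuel rem rp cs).map (fun p => p.map (fun se => se.2 - se.1))
        = pvB_specF length minL maxL pre fuel rem rp cs := by
  intro fuel
  induction fuel with
  | zero => intro rem rp cs _; rfl
  | succ fuel ih =>
    intro rem rp cs hcs
    simp only [pvA_spec, pvB_specF]
    by_cases h1 : rem = 0 ∧ (rp = none ∨ rp = some 0)
    · rw [if_pos h1, if_pos h1]; rfl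
    rw [if_neg h1, if_neg h1]
    by_cases h2 : rem < minL ∨ rp = some 0
    · rw [if_pos h2, if_pos h2]; rfl
    rw [if_neg h2, if_neg h2]
    have hrp : (match rp with
        | none => none
        | some k => if k = 0 then none else some (k - 1)) = rp.map (fun k => k - 1) := by
      match rp with
      | none => rfl
      | some k =>
        have : ¬ k = 0 := fun hk => h2 (Or.inr (by rw [hk]))
        simp [this]
    rw [pvNestedFold _ _ (fun size start => pvA_isAvail av start (start + size) = true),
        pvNestedFold _ _ (fun size start =>
          pvGetItem pre (start + size) 0 = pvGetItem pre start 0)]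
    rw [List.map_flatMap]
    apply List.flatMap_congr
    intro size hsize
    obtain ⟨hs1, hs2⟩ := PySem.List.mem_pyRange_one.mp hsize
    rw [List.map_flatMap]
    apply List.flatMap_congr
    intro start hstart
    obtain ⟨ht1, ht2⟩ := PySem.List.mem_pyRange_one.mp hstart
    have hbounds : 0 ≤ start ∧ start < start + size ∧ start + size ≤ length := by omega
    by_cases hc : pvA_isAvail av start (start + size) = true
    · rw [if_pos hc, if_pos ((H start (start + size) hbounds.1 hbounds.2.1 hbounds.2.2).mp hc)]
      rw [List.map_map, hrp]
      have hfun : ((fun p => List.map (fun se : Int × Int => se.2 - se.1) p)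
            ∘ fun p => (start, start + size) :: p)
          = ((fun t => size :: t) ∘ (fun p => List.map (fun se : Int × Int => se.2 - se.1) p)) := by
        funext p
        simp
      rw [hfun, ← List.map_map, ih (rem - size) (rp.map (fun k => k - 1)) (start + size) (by omega)]
    · rw [if_neg hc, if_neg (fun hb => hc ((H start (start + size)
        hbounds.1 hbounds.2.1 hbounds.2.2).mpr hb))]
      rfl

-- ---------- fuel stability for A's reference recursion ----------
lemma pvA_spec_stable (length minL maxL : Int) (av : Array Bool) (hmin : 1 ≤ minL) :
    ∀ (f g : Nat) (rem : Int) (rp : Option Int) (cs : Int), rem.toNat < f → rem.toNat < g →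
      pvA_spec length minL maxL av f rem rp cs = pvA_spec length minL maxL av g rem rp cs := by
  intro f
  induction f with
  | zero => intro g rem rp cs hf; omega
  | succ f ihf =>
    intro g rem rp cs hf hg
    match g with
    | 0 => omega
    | g+1 =>
      simp only [pvA_spec]
      by_cases h1 : rem = 0 ∧ (rp = none ∨ rp = some 0)
      · rw [if_pos h1, if_pos h1]
      rw [if_neg h1, if_neg h1]
      by_cases h2 : rem < minL ∨ rp = some 0
      · rw [if_pos h2, if_pos h2]
      rw [if_neg h2, if_neg h2]
      rw [pvNestedFold _ _ (fun size start => pvA_isAvail av start (start + size) = true),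
          pvNestedFold _ _ (fun size start => pvA_isAvail av start (start + size) = true)]
      apply List.flatMap_congr
      intro size hsize
      obtain ⟨hs1, hs2⟩ := PySem.List.mem_pyRange_one.mp hsize
      apply List.flatMap_congr
      intro start hstart
      by_cases hc : pvA_isAvail av start (start + size) = true
      · rw [if_pos hc, if_pos hc]
        congr 1
        exact ihf g (rem - size) _ (start + size) (by omega) (by omega)
      · rw [if_neg hc, if_neg hc]

-- ---------- memoisation on A's side is value-transparent ----------
lemma pvRpEq (rp : Option Int) :
    ¬ rp = some 0 →
    (match rp with
     | none => none
     | some k => if k = 0 then none else some (k - 1) : Option Int)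
      = rp.map (fun k => k - 1) := by
  intro h
  match rp with
  | none => rfl
  | some k =>
    have : ¬ k = 0 := fun hk => h (by rw [hk])
    simp [this]

def pvA_Inv (length minL maxL : Int) (av : Array Bool)
    (dp : Std.HashMap (Int × Option Int × Int) (List (List (Int × Int)))) : Prop :=
  ∀ (k : Int × Option Int × Int) v, dp[k]? = some v →
    v = pvA_spec length minL maxL av (k.1.toNat + 1) k.1 k.2.1 k.2.2

lemma pvA_memo_sound (length minL maxL : Int) (av : Array Bool) (hmin : 1 ≤ minL) :
    ∀ (fuel : Nat) (dp : Std.HashMap (Int × Option Int × Int) (List (List (Int × Int))))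
      (rem : Int) (rp : Option Int) (cs : Int),
      pvA_Inv length minL maxL av dp → rem.toNat < fuel →
      (pvA_helper length minL maxL av fuel dp rem rp cs).2 = pvA_spec length minL maxL av fuel rem rp cs
        ∧ pvA_Inv length minL maxL av (pvA_helper length minL maxL av fuel dp rem rp cs).1 := by
  intro fuel
  induction fuel with
  | zero => intro dp rem rp cs _ h; omega
  | succ fuel ih =>
    intro dp rem rp cs hinv hf
    simp only [pvA_helper]
    cases hhit : dp[(rem, rp, cs)]? with
    | some v =>
      refine ⟨?_, hinv⟩
      rw [hinv (rem, rp, cs) v hhit]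
      exact pvA_spec_stable length minL maxL av hmin _ _ rem rp cs (by omega) hf
    | none =>
      by_cases h1 : rem = 0 ∧ (rp = none ∨ rp = some 0)
      · rw [if_pos h1]
        exact ⟨by simp only [pvA_spec]; rw [if_pos h1], hinv⟩
      rw [if_neg h1]
      by_cases h2 : rem < minL ∨ rp = some 0
      · rw [if_pos h2]
        exact ⟨by simp only [pvA_spec]; rw [if_neg h1, if_pos h2], hinv⟩
      rw [if_neg h2]
      have hrem1 : 1 ≤ rem := by omega
      rw [pvRpEq rp (fun hk => h2 (Or.inr hk))]
      have inner : ∀ (size : Int), minL ≤ size → ∀ (l : List Int)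
          (st : Std.HashMap (Int × Option Int × Int) (List (List (Int × Int))) × List (List (Int × Int))),
          pvA_Inv length minL maxL av st.1 →
          ((l.foldl (fun st2 start =>
              if pvA_isAvail av start (start + size) then
                ((pvA_helper length minL maxL av fuel st2.1 (rem - size) (rp.map (fun k => k - 1)) (start + size)).1,
                  st2.2 ++ (pvA_helper length minL maxL av fuel st2.1 (rem - size) (rp.map (fun k => k - 1)) (start + size)).2.map (fun p => (start, start + size) :: p))
              else st2) st).2
            = st.2 ++ l.flatMap (fun start =>
                if pvA_isAvail av start (start + size) then
                  (pvA_spec length minL maxL av fuel (rem - size) (rp.map (fun k => k - 1)) (start + size)).map (fun p => (start, start + size) :: p)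
                else []))
          ∧ pvA_Inv length minL maxL av (l.foldl (fun st2 start =>
              if pvA_isAvail av start (start + size) then
                ((pvA_helper length minL maxL av fuel st2.1 (rem - size) (rp.map (fun k => k - 1)) (start + size)).1,
                  st2.2 ++ (pvA_helper length minL maxL av fuel st2.1 (rem - size) (rp.map (fun k => k - 1)) (start + size)).2.map (fun p => (start, start + size) :: p))
              else st2) st).1 := by
        intro size hsz l
        induction l with
        | nil => intro st hst; exact ⟨by simp, hst⟩
        | cons start l ihl =>
          intro st hst
          simp only [List.foldl_cons, List.flatMap_cons]
          by_cases hc : pvA_isAvail av start (start + size)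
          · rw [if_pos hc, if_pos hc]
            obtain ⟨hr2, hr1⟩ := ih st.1 (rem - size) (rp.map (fun k => k - 1)) (start + size) hst (by omega)
            obtain ⟨hl2, hl1⟩ := ihl
              ((pvA_helper length minL maxL av fuel st.1 (rem - size) (rp.map (fun k => k - 1)) (start + size)).1, st.2 ++ (pvA_helper length minL maxL av fuel st.1 (rem - size) (rp.map (fun k => k - 1)) (start + size)).2.map (fun p => (start, start + size) :: p)) hr1
            refine ⟨?_, hl1⟩
            rw [hl2]
            dsimp only
            rw [hr2, List.append_assoc]
          · rw [if_neg hc, if_neg hc]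
            obtain ⟨hl2, hl1⟩ := ihl st hst
            refine ⟨?_, hl1⟩
            rw [hl2]
            simp
      have outer : ∀ (l : List Int), (∀ size ∈ l, minL ≤ size) → ∀ (st : Std.HashMap (Int × Option Int × Int) (List (List (Int × Int))) × List (List (Int × Int))),
          pvA_Inv length minL maxL av st.1 →
          ((l.foldl (fun st size =>
              (PySem.List.pyRange cs (length - size + 1) 1).foldl (fun st2 start =>
              if pvA_isAvail av start (start + size) then
                ((pvA_helper length minL maxL av fuel st2.1 (rem - size) (rp.map (fun k => k - 1)) (start + size)).1,
                  st2.2 ++ (pvA_helper length minL maxL av fuel st2.1 (rem - size) (rp.map (fun k => k - 1)) (start + size)).2.map (fun p => (start, start + size) :: p))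
              else st2) st) st).2
            = st.2 ++ l.flatMap (fun size =>
                (PySem.List.pyRange cs (length - size + 1) 1).flatMap (fun start =>
                if pvA_isAvail av start (start + size) then
                  (pvA_spec length minL maxL av fuel (rem - size) (rp.map (fun k => k - 1)) (start + size)).map (fun p => (start, start + size) :: p)
                else [])))
          ∧ pvA_Inv length minL maxL av (l.foldl (fun st size =>
              (PySem.List.pyRange cs (length - size + 1) 1).foldl (fun st2 start =>
              if pvA_isAvail av start (start + size) then
                ((pvA_helper length minL maxL av fuel st2.1 (rem - size) (rp.map (fun k => k - 1)) (start + size)).1,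
                  st2.2 ++ (pvA_helper length minL maxL av fuel st2.1 (rem - size) (rp.map (fun k => k - 1)) (start + size)).2.map (fun p => (start, start + size) :: p))
              else st2) st) st).1 := by
        intro l
        induction l with
        | nil => intro _ st hst; exact ⟨by simp, hst⟩
        | cons size l ihl =>
          intro hszs st hst
          simp only [List.foldl_cons, List.flatMap_cons]
          obtain ⟨hi2, hi1⟩ := inner size (hszs size (List.mem_cons_self)) _ st hst
          obtain ⟨hl2, hl1⟩ := ihl (fun t ht => hszs t (List.mem_cons_of_mem _ ht)) _ hi1
          refine ⟨?_, hl1⟩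
          rw [hl2, hi2, List.append_assoc]
      obtain ⟨ho2, ho1⟩ := outer (PySem.List.pyRange minL (min maxL rem + 1) 1)
        (fun t ht => (PySem.List.mem_pyRange_one.mp ht).1) (dp, []) hinv
      have hval : ((PySem.List.pyRange minL (min maxL rem + 1) 1).foldl (fun st size =>
              (PySem.List.pyRange cs (length - size + 1) 1).foldl (fun st2 start =>
              if pvA_isAvail av start (start + size) then
                ((pvA_helper length minL maxL av fuel st2.1 (rem - size) (rp.map (fun k => k - 1)) (start + size)).1,
                  st2.2 ++ (pvA_helper length minL maxL av fuel st2.1 (rem - size) (rp.map (fun k => k - 1)) (start + size)).2.map (fun p => (start, start + size) :: p))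
              else st2) st) (dp, [])).2
          = pvA_spec length minL maxL av (fuel + 1) rem rp cs := by
        rw [ho2]
        simp only [pvA_spec]
        rw [if_neg h1, if_neg h2, pvRpEq rp (fun hk => h2 (Or.inr hk))]
        rw [pvNestedFold _ _ (fun size start => pvA_isAvail av start (start + size) = true)]
        simp
      refine ⟨hval, ?_⟩
      intro k v hk
      by_cases hkey : k = (rem, rp, cs)
      · subst hkey
        rw [Std.HashMap.getElem?_insert_self] at hk
        have hv : v = ((PySem.List.pyRange minL (min maxL rem + 1) 1).foldl (fun st size =>
              (PySem.List.pyRange cs (length - size + 1) 1).foldl (fun st2 start =>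
              if pvA_isAvail av start (start + size) then
                ((pvA_helper length minL maxL av fuel st2.1 (rem - size) (rp.map (fun k => k - 1)) (start + size)).1,
                  st2.2 ++ (pvA_helper length minL maxL av fuel st2.1 (rem - size) (rp.map (fun k => k - 1)) (start + size)).2.map (fun p => (start, start + size) :: p))
              else st2) st) (dp, [])).2 :=
          (Option.some.injEq _ _).mp hk.symm
        rw [hv, hval]
        exact pvA_spec_stable length minL maxL av hmin _ _ rem rp cs (by omega) (by omega)
      · rw [Std.HashMap.getElem?_insert, if_neg (by simpa using Ne.symm hkey)] at hk
        exact ho1 k v hk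

-- ---------- fuel stability for B's reference recursion ----------
lemma pvB_specF_stable (length minL maxL : Int) (pre : Array Int) (hmin : 1 ≤ minL) :
    ∀ (f g : Nat) (rem : Int) (rp : Option Int) (cs : Int), rem.toNat < f → rem.toNat < g →
      pvB_specF length minL maxL pre f rem rp cs = pvB_specF length minL maxL pre g rem rp cs := by
  intro f
  induction f with
  | zero => intro g rem rp cs hf; omega
  | succ f ihf =>
    intro g rem rp cs hf hg
    match g with
    | 0 => omega
    | g+1 =>
      simp only [pvB_specF]
      by_cases h1 : rem = 0 ∧ (rp = none ∨ rp = some 0)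
      · rw [if_pos h1, if_pos h1]
      rw [if_neg h1, if_neg h1]
      by_cases h2 : rem < minL ∨ rp = some 0
      · rw [if_pos h2, if_pos h2]
      rw [if_neg h2, if_neg h2]
      rw [pvNestedFold _ _ (fun size start =>
            pvGetItem pre (start + size) 0 = pvGetItem pre start 0),
          pvNestedFold _ _ (fun size start =>
            pvGetItem pre (start + size) 0 = pvGetItem pre start 0)]
      apply List.flatMap_congr
      intro size hsize
      obtain ⟨hs1, hs2⟩ := PySem.List.mem_pyRange_one.mp hsize
      apply List.flatMap_congr
      intro start hstart
      by_cases hc : pvGetItem pre (start + size) 0 = pvGetItem pre start 0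
      · rw [if_pos hc, if_pos hc]
        congr 1
        exact ihf g (rem - size) _ (start + size) (by omega) (by omega)
      · rw [if_neg hc, if_neg hc]

-- ---------- B's dead-state set is value-transparent ----------
def pvB_Inv (length minL maxL : Int) (pre : Array Int)
    (dead : Std.HashSet (Int × Option Int × Int)) : Prop :=
  ∀ k : Int × Option Int × Int, k ∈ dead →
    pvB_specF length minL maxL pre (k.1.toNat + 1) k.1 k.2.1 k.2.2 = []

lemma pvGo_sound (length minL maxL : Int) (pre : Array Int) (hmin : 1 ≤ minL) :
    ∀ (fuel : Nat) (st : Std.HashSet (Int × Option Int × Int) × List (List Int))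
      (rem : Int) (parts : Option Int) (cs : Int) (acc : List Int),
      pvB_Inv length minL maxL pre st.1 → rem.toNat < fuel →
      (pvB_go length minL maxL pre fuel rem parts cs acc st).2
          = st.2 ++ (pvB_specF length minL maxL pre fuel rem parts cs).map (fun t => acc ++ t)
        ∧ pvB_Inv length minL maxL pre (pvB_go length minL maxL pre fuel rem parts cs acc st).1 := by
  intro fuel
  induction fuel with
  | zero => intro st rem parts cs acc _ h; omega
  | succ fuel ih =>
    intro st rem parts cs acc hinv hf
    simp only [pvB_go]
    by_cases h1 : rem = 0 ∧ (parts = none ∨ parts = some 0)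
    · rw [if_pos h1]
      refine ⟨?_, hinv⟩
      rw [show pvB_specF length minL maxL pre (fuel + 1) rem parts cs = [[]] from by
        simp only [pvB_specF]; rw [if_pos h1]]
      simp
    rw [if_neg h1]
    by_cases h2 : rem < minL ∨ parts = some 0
    · rw [if_pos h2]
      refine ⟨?_, hinv⟩
      rw [show pvB_specF length minL maxL pre (fuel + 1) rem parts cs = [] from by
        simp only [pvB_specF]; rw [if_neg h1, if_pos h2]]
      simp
    rw [if_neg h2]
    by_cases hdead : (rem, parts, cs) ∈ st.1
    · rw [if_pos hdead]
      refine ⟨?_, hinv⟩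
      rw [pvB_specF_stable length minL maxL pre hmin (fuel + 1) (rem.toNat + 1)
        rem parts cs (by omega) (by omega), hinv (rem, parts, cs) hdead]
      simp
    rw [if_neg hdead]
    have hrem1 : 1 ≤ rem := by omega
    have inner : ∀ (size : Int), minL ≤ size → ∀ (l : List Int)
        (st : Std.HashSet (Int × Option Int × Int) × List (List Int)),
        pvB_Inv length minL maxL pre st.1 →
        ((l.foldl (fun st2 start =>
            if pvGetItem pre (start + size) 0 = pvGetItem pre start 0 then
              pvB_go length minL maxL pre fuel (rem - size) (parts.map (fun k => k - 1))
                (start + size) (acc ++ [size]) st2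
            else st2) st).2
          = st.2 ++ l.flatMap (fun start =>
              if pvGetItem pre (start + size) 0 = pvGetItem pre start 0 then
                (pvB_specF length minL maxL pre fuel (rem - size) (parts.map (fun k => k - 1))
                  (start + size)).map (fun t => (acc ++ [size]) ++ t)
              else []))
        ∧ pvB_Inv length minL maxL pre (l.foldl (fun st2 start =>
            if pvGetItem pre (start + size) 0 = pvGetItem pre start 0 then
              pvB_go length minL maxL pre fuel (rem - size) (parts.map (fun k => k - 1))
                (start + size) (acc ++ [size]) st2
            else st2) st).1 := by
      intro size hsz l
      induction l with
      | nil => intro st hst; exact ⟨by simp, hst⟩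
      | cons start l ihl =>
        intro st hst
        simp only [List.foldl_cons, List.flatMap_cons]
        by_cases hc : pvGetItem pre (start + size) 0 = pvGetItem pre start 0
        · rw [if_pos hc, if_pos hc]
          obtain ⟨hr2, hr1⟩ := ih st (rem - size) (parts.map (fun k => k - 1)) (start + size)
            (acc ++ [size]) hst (by omega)
          obtain ⟨hl2, hl1⟩ := ihl
            (pvB_go length minL maxL pre fuel (rem - size) (parts.map (fun k => k - 1))
              (start + size) (acc ++ [size]) st) hr1
          refine ⟨?_, hl1⟩
          rw [hl2, hr2, List.append_assoc]
        · rw [if_neg hc, if_neg hc]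
          obtain ⟨hl2, hl1⟩ := ihl st hst
          refine ⟨?_, hl1⟩
          rw [hl2]
          simp
    have outer : ∀ (l : List Int), (∀ size ∈ l, minL ≤ size) →
        ∀ (st : Std.HashSet (Int × Option Int × Int) × List (List Int)),
        pvB_Inv length minL maxL pre st.1 →
        ((l.foldl (fun st1 size =>
            (PySem.List.pyRange cs (length - size + 1) 1).foldl (fun st2 start =>
              if pvGetItem pre (start + size) 0 = pvGetItem pre start 0 then
                pvB_go length minL maxL pre fuel (rem - size) (parts.map (fun k => k - 1))
                  (start + size) (acc ++ [size]) st2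
              else st2) st1) st).2
          = st.2 ++ l.flatMap (fun size =>
              (PySem.List.pyRange cs (length - size + 1) 1).flatMap (fun start =>
                if pvGetItem pre (start + size) 0 = pvGetItem pre start 0 then
                  (pvB_specF length minL maxL pre fuel (rem - size) (parts.map (fun k => k - 1))
                    (start + size)).map (fun t => (acc ++ [size]) ++ t)
                else [])))
        ∧ pvB_Inv length minL maxL pre (l.foldl (fun st1 size =>
            (PySem.List.pyRange cs (length - size + 1) 1).foldl (fun st2 start =>
              if pvGetItem pre (start + size) 0 = pvGetItem pre start 0 then
                pvB_go length minL maxL pre fuel (rem - size) (parts.map (fun k => k - 1))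
                  (start + size) (acc ++ [size]) st2
              else st2) st1) st).1 := by
      intro l
      induction l with
      | nil => intro _ st hst; exact ⟨by simp, hst⟩
      | cons size l ihl =>
        intro hszs st hst
        simp only [List.foldl_cons, List.flatMap_cons]
        obtain ⟨hi2, hi1⟩ := inner size (hszs size (List.mem_cons_self)) _ st hst
        obtain ⟨hl2, hl1⟩ := ihl (fun t ht => hszs t (List.mem_cons_of_mem _ ht)) _ hi1
        refine ⟨?_, hl1⟩
        rw [hl2, hi2, List.append_assoc]
    obtain ⟨ho2, ho1⟩ := outer (PySem.List.pyRange minL (min maxL rem + 1) 1)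
      (fun t ht => (PySem.List.mem_pyRange_one.mp ht).1) st hinv
    have hM : (PySem.List.pyRange minL (min maxL rem + 1) 1).flatMap (fun size =>
          (PySem.List.pyRange cs (length - size + 1) 1).flatMap (fun start =>
            if pvGetItem pre (start + size) 0 = pvGetItem pre start 0 then
              (pvB_specF length minL maxL pre fuel (rem - size) (parts.map (fun k => k - 1))
                (start + size)).map (fun t => (acc ++ [size]) ++ t)
            else []))
        = (pvB_specF length minL maxL pre (fuel + 1) rem parts cs).map (fun t => acc ++ t) := by
      simp only [pvB_specF]
      rw [if_neg h1, if_neg h2]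
      rw [pvNestedFold _ _ (fun size start =>
        pvGetItem pre (start + size) 0 = pvGetItem pre start 0)]
      rw [List.map_flatMap]
      apply List.flatMap_congr
      intro size _
      rw [List.map_flatMap]
      apply List.flatMap_congr
      intro start _
      split
      · rw [List.map_map]
        apply List.map_congr_left
        intro t _
        simp
      · rfl
    rw [hM] at ho2
    split
    · rename_i hlen
      refine ⟨ho2, ?_⟩
      intro k hk
      rw [Std.HashSet.mem_insert] at hk
      rcases hk with hk | hk
      · have hkeq : (rem, parts, cs) = k := by
          simpa using hk
        subst hkeq
        have hmapnil : (pvB_specF length minL maxL pre (fuel + 1) rem parts cs).map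
            (fun t => acc ++ t) = [] := by
          have := congrArg List.length ho2
          rw [hlen] at this
          simp only [List.length_append] at this
          have : ((pvB_specF length minL maxL pre (fuel + 1) rem parts cs).map
              (fun t => acc ++ t)).length = 0 := by omega
          exact List.length_eq_zero_iff.mp this
        have hnil : pvB_specF length minL maxL pre (fuel + 1) rem parts cs = [] := by
          exact List.map_eq_nil_iff.mp hmapnil
        show pvB_specF length minL maxL pre (rem.toNat + 1) rem parts cs = []
        rw [pvB_specF_stable length minL maxL pre hmin (rem.toNat + 1) (fuel + 1)
          rem parts cs (by omega) (by omega), hnil]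
      · exact ho1 k hk
    · exact ⟨ho2, ho1⟩

-- ===== VERDICT (by name: the statement is the Claim_ definition above) =====
theorem partition_with_occupy_dp_spec : Claim_equal_partition_with_occupy_dp := by
  intro length min_length max_length occupied_segments num_partitions _hdom hpre
  unfold Spec_partition_with_occupy_dp
  unfold partition_with_occupy_dp partition_with_occupy_dp_alt
  dsimp only
  obtain ⟨hmin, hb⟩ := hpre
  set maxL := max_length.getD length
  set occ := occupied_segments.getD []
  set rem := length - (occ.map (fun se => se.2 - se.1)).sum with hrem
  have hempA : pvA_Inv length min_length maxL (pvA_avail length occ) ∅ := by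
    intro k v hk
    rw [Std.HashMap.getElem?_empty] at hk
    exact absurd hk (by simp)
  rw [(pvA_memo_sound length min_length maxL (pvA_avail length occ) hmin
      (rem.toNat + 1) ∅ rem num_partitions 0 hempA (by omega)).1]
  have hempB : pvB_Inv length min_length maxL (pvB_pre length (pvB_diff length occ)) ∅ := by
    intro k hk
    exact absurd hk (by simp)
  rw [(pvGo_sound length min_length maxL (pvB_pre length (pvB_diff length occ)) hmin
      (rem.toNat + 1) (∅, []) rem num_partitions 0 [] hempB (by omega)).1]
  simp only [List.nil_append, List.map_id']
  exact pvHelper_eq length min_length maxL _ _ hmin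
    (fun s e hs hse he => by
      rw [pvA_isAvail_iff length _ hb s e hs he,
        pvB_pre_eq_iff length _ hb s e hs (le_of_lt hse) he])
    _ _ num_partitions 0 le_rfl
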